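-- pv_equiv track=rewrite | github.com/mfree1989/codingchallenges | Python Programming Challenges.py | isGreaterThan
-- ===== SOURCE A (Python) =====
-- def isGreaterThan(dict1, dict2):  # a function which takes as input two dictionaries having only string keys and numerical values, and checks if one is greater than the other
--     for key in dict2.keys():  # checks the keys in dict2
--         if key not in dict1.keys():  # this if statement commands the function to compare the keys in both dictionaries, if the key is not in dict1 our return will be false
--             return False
--     s = False
--     for key in dict2:
--         for key2 in dict1:
--             if key == key2:  # this loop compares the values of each dictionary
--                 if dict2[key] > dict1[key2]:
--                     return False  # return is sashaying away from the problem and getting me out of the loop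
--                 elif dict1[key2] > dict2[key]:
--                     s = True
--     if s == True:
--         return True
--     else:
--         return False
-- ===== SOURCE B (Python) =====
-- def isGreaterThan(dict1, dict2):
--     strict = False
--     for k, v in dict2.items():
--         if k not in dict1 or dict1[k] < v:
--             return False
--         strict = strict or dict1[k] > v
--     return strict
-- ===== Notes on version B (the rewrite author's own statement) =====
-- stated objective: alternative
-- what changed: A's staged design (a key-subset loop, then a nested loop over dict1 carrying an s flag with early returns) is replaced by one fused pass over dict2.items() threading a strict-evidence accumulator: each item is checked for domination exactly once and the pass aborts on failure.
import Mathlib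
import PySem

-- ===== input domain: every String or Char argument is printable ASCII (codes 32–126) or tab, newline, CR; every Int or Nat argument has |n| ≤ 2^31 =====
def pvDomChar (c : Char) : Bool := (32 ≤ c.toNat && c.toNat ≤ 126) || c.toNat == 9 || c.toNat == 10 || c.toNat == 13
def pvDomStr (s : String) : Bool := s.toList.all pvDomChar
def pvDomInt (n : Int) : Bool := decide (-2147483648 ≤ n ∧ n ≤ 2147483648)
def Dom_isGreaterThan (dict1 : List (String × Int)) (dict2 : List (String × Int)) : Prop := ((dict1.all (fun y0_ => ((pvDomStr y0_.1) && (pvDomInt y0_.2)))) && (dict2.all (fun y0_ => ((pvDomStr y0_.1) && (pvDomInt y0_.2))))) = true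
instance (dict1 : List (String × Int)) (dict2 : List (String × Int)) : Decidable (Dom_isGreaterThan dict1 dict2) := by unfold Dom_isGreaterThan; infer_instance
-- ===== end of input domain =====

-- B replaces A's staged design (key-subset loop, then nested dict1 scan with an s flag)
-- by one fused pass over dict2.items() threading a strict-evidence accumulator
-- (alternative decomposition).


-- ===== PORT A =====
-- first loop: 'for key in dict2.keys(): if key not in dict1.keys(): return False'
def aKeysLoop (d1 : PySem.Dict String Int) : List String → Bool
  | [] => true
  | k :: ks => if d1.contains k then aKeysLoop d1 ks else false

-- inner loop 'for key2 in dict1:' over dict1's keys; `none` models the early 'return False'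
def aInner (d1 d2 : PySem.Dict String Int) (key : String) : List String → Bool → Option Bool
  | [], s => some s
  | k2 :: ks, s =>
    if key == k2 then
      if d2.getD key 0 > d1.getD k2 0 then none
      else if d1.getD k2 0 > d2.getD key 0 then aInner d1 d2 key ks true
      else aInner d1 d2 key ks s
    else aInner d1 d2 key ks s

-- outer loop 'for key in dict2:' carrying the flag s; `none` models the early 'return False'
def aOuter (d1 d2 : PySem.Dict String Int) : List String → Bool → Option Bool
  | [], s => some s
  | k :: ks, s =>
    match aInner d1 d2 k d1.keys s with
    | none => none
    | some s' => aOuter d1 d2 ks s'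

def isGreaterThan (dict1 : List (String × Int)) (dict2 : List (String × Int)) : Bool :=
  let d1 := PySem.Dict.ofList dict1
  let d2 := PySem.Dict.ofList dict2
  if aKeysLoop d1 d2.keys then
    match aOuter d1 d2 d2.keys false with
    | none => false
    | some s => if s = true then true else false
  else false

-- ===== PORT B =====
-- B's loop 'for k, v in dict2.items():' with the strict accumulator; early 'return False' = stop
def bGo (d1 : PySem.Dict String Int) : List (String × Int) → Bool → Bool
  | [], strict => strict
  | (k, v) :: rest, strict =>
    match d1.get? k with          -- 'k not in dict1' → none
    | none => false
    | some w => if w < v then false else bGo d1 rest (strict || decide (w > v))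

def isGreaterThan_alt (dict1 : List (String × Int)) (dict2 : List (String × Int)) : Bool :=
  let d1 := PySem.Dict.ofList dict1
  let d2 := PySem.Dict.ofList dict2
  bGo d1 d2.items false

-- ===== PRECONDITION & SPEC =====
def Spec_isGreaterThan (dict1 : List (String × Int)) (dict2 : List (String × Int)) (out : Bool) : Prop := out = isGreaterThan_alt dict1 dict2
instance (dict1 : List (String × Int)) (dict2 : List (String × Int)) (out : Bool) : Decidable (Spec_isGreaterThan dict1 dict2 out) := by unfold Spec_isGreaterThan; infer_instance

-- ===== CLAIM (what is proved, stated in full; the proofs are below) =====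
def Claim_equal_isGreaterThan : Prop := ∀ (dict1 : List (String × Int)) (dict2 : List (String × Int)), Dom_isGreaterThan dict1 dict2 → Spec_isGreaterThan dict1 dict2 (isGreaterThan dict1 dict2)

-- ===== LEMMAS AND PROOFS =====

theorem aKeysLoop_eq_all (d1 : PySem.Dict String Int) (ks : List String) :
    aKeysLoop d1 ks = ks.all fun k => d1.contains k := by
  induction ks with
  | nil => rfl
  | cons k ks ih => simp [aKeysLoop, List.all_cons]; by_cases h : d1.contains k <;> simp [h, ih]

theorem aInner_not_mem (d1 d2 : PySem.Dict String Int) (key : String) (l : List String)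
    (s : Bool) (h : key ∉ l) : aInner d1 d2 key l s = some s := by
  induction l with
  | nil => rfl
  | cons k2 ks ih =>
    have h1 : key ≠ k2 := fun he => h (he ▸ List.mem_cons_self)
    simp [aInner, h1, ih (fun hm => h (List.mem_cons_of_mem _ hm))]

theorem aInner_mem (d1 d2 : PySem.Dict String Int) (key : String) (l : List String)
    (s : Bool) (hnd : l.Nodup) (hm : key ∈ l) :
    aInner d1 d2 key l s =
      if d2.getD key 0 > d1.getD key 0 then none
      else some (s || decide (d1.getD key 0 > d2.getD key 0)) := by
  induction l generalizing s with
  | nil => cases hm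
  | cons k2 ks ih =>
    rcases List.mem_cons.mp hm with he | hm'
    · subst he
      have hnot : key ∉ ks := (List.nodup_cons.mp hnd).1
      by_cases h1 : d2.getD key 0 > d1.getD key 0
      · simp [aInner, h1]
      · by_cases h2 : d1.getD key 0 > d2.getD key 0 <;>
          simp [aInner, h1, h2, aInner_not_mem d1 d2 key ks _ hnot]
    · have h1 : key ≠ k2 := fun he => (List.nodup_cons.mp hnd).1 (he ▸ hm')
      have := ih s (List.nodup_cons.mp hnd).2 hm'
      simp only [aInner]
      rw [if_neg (by simpa using h1)]
      exact this

theorem aOuter_char (d1 d2 : PySem.Dict String Int) (l : List String) (s : Bool)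
    (hnd1 : d1.keys.Nodup) (hsub : ∀ k ∈ l, k ∈ d1.keys) :
    aOuter d1 d2 l s =
      if l.any (fun k => decide (d2.getD k 0 > d1.getD k 0)) then none
      else some (s || l.any fun k => decide (d1.getD k 0 > d2.getD k 0)) := by
  induction l generalizing s with
  | nil => simp [aOuter]
  | cons k ks ih =>
    have hk : k ∈ d1.keys := hsub k List.mem_cons_self
    rw [aOuter, aInner_mem d1 d2 k d1.keys s hnd1 hk]
    by_cases h1 : d2.getD k 0 > d1.getD k 0
    · simp [h1]
    · simp only [h1, ite_false]
      rw [ih _ (fun k' hk' => hsub k' (List.mem_cons_of_mem _ hk'))]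
      by_cases h2 : ks.any (fun k' => decide (d2.getD k' 0 > d1.getD k' 0)) <;>
        simp [h1, h2, Bool.or_assoc]

theorem pvAllCongrMem {α : Type} {l : List α} {p q : α → Bool}
    (h : ∀ a ∈ l, p a = q a) : l.all p = l.all q := by
  induction l with
  | nil => rfl
  | cons a t ih =>
    simp only [List.all_cons, h a List.mem_cons_self,
      ih (fun b hb => h b (List.mem_cons_of_mem _ hb))]

theorem pvAnyCongrMem {α : Type} {l : List α} {p q : α → Bool}
    (h : ∀ a ∈ l, p a = q a) : l.any p = l.any q := by
  induction l with
  | nil => rfl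
  | cons a t ih =>
    simp only [List.any_cons, h a List.mem_cons_self,
      ih (fun b hb => h b (List.mem_cons_of_mem _ hb))]

-- B's recursion, characterised over an arbitrary item list
theorem bGo_char (d1 : PySem.Dict String Int) (l : List (String × Int)) (s : Bool) :
    bGo d1 l s =
      if l.all (fun p => match d1.get? p.1 with
                          | none => false
                          | some w => decide (¬ w < p.2)) then
        s || l.any (fun p => decide ((d1.get? p.1).getD 0 > p.2))
      else false := by
  induction l generalizing s with
  | nil => simp [bGo]
  | cons p rest ih =>
    obtain ⟨k, v⟩ := p
    simp only [bGo, List.all_cons, List.any_cons]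
    cases hg : d1.get? k with
    | none => simp
    | some w =>
      by_cases hlt : w < v
      · simp [hlt]
      · by_cases hall : rest.all (fun p => match d1.get? p.1 with
                          | none => false
                          | some w => decide (¬ w < p.2)) <;>
          simp [hlt, ih, Bool.or_assoc]

-- ===== VERDICT (by name: the statement is the Claim_ definition above) =====
theorem isGreaterThan_spec : Claim_equal_isGreaterThan := by
  intro dict1 dict2 _
  unfold Spec_isGreaterThan isGreaterThan isGreaterThan_alt
  dsimp only
  have hnd1 : (PySem.Dict.ofList dict1 : PySem.Dict String Int).keys.Nodup :=
    PySem.Dict.nodup_keys_ofList dict1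
  have hnd2 : (PySem.Dict.ofList dict2 : PySem.Dict String Int).keys.Nodup :=
    PySem.Dict.nodup_keys_ofList dict2
  generalize PySem.Dict.ofList dict1 = d1 at hnd1 ⊢
  generalize PySem.Dict.ofList dict2 = d2 at hnd2 ⊢
  rw [aKeysLoop_eq_all, bGo_char, PySem.Dict.items_eq_map_keys d2 hnd2 0,
      List.all_map, List.any_map]
  by_cases hsub : d2.keys.all (fun k => d1.contains k)
  · have hmem : ∀ k ∈ d2.keys, k ∈ d1.keys := by
      intro k hk
      exact (PySem.Dict.contains_iff_mem_keys d1 k).mp (List.all_eq_true.mp hsub k hk)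
    have hget : ∀ k ∈ d2.keys, d1.get? k = some (d1.getD k 0) := by
      intro k hk
      have hc : d1.contains k := List.all_eq_true.mp hsub k hk
      rw [PySem.Dict.contains_eq_isSome_get?] at hc
      cases hg : d1.get? k with
      | none => rw [hg] at hc; simp at hc
      | some w => rw [PySem.Dict.getD_of_get?_eq_some _ _ hg]
    rw [aOuter_char d1 d2 d2.keys false hnd1 hmem]
    have hall : (d2.keys.all ((fun p => match d1.get? p.1 with
                          | none => false
                          | some w => decide (¬ w < p.2)) ∘ fun k => (k, d2.getD k 0)))
        = d2.keys.all fun k => decide (¬ d1.getD k 0 < d2.getD k 0) := by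
      apply pvAllCongrMem
      intro k hk
      simp [Function.comp, hget k hk]
    have hany : (d2.keys.any ((fun p => decide ((d1.get? p.1).getD 0 > p.2)) ∘ fun k => (k, d2.getD k 0)))
        = d2.keys.any fun k => decide (d1.getD k 0 > d2.getD k 0) := by
      apply pvAnyCongrMem
      intro k hk
      simp [Function.comp, hget k hk]
    rw [hall, hany]
    by_cases hbad : d2.keys.any (fun k => decide (d2.getD k 0 > d1.getD k 0))
    · have hfalse : (d2.keys.all fun k => decide (¬ d1.getD k 0 < d2.getD k 0)) = false := by
        rcases List.any_eq_true.mp hbad with ⟨k, hk, hgt⟩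
        simp only [List.all_eq_false]
        exact ⟨k, hk, by simpa using hgt⟩
      rw [hfalse]
      simp [hsub, hbad]
    · have htrue : (d2.keys.all fun k => decide (¬ d1.getD k 0 < d2.getD k 0)) = true := by
        simp only [List.all_eq_true]
        intro k hk
        have := List.any_eq_false.mp (Bool.of_not_eq_true hbad) k hk
        simpa using this
      have hbad' := Bool.of_not_eq_true hbad
      rw [htrue]
      by_cases hstr : d2.keys.any (fun k => decide (d1.getD k 0 > d2.getD k 0)) <;>
        simp [hsub, hbad', hstr]
  · -- some key of dict2 is missing from dict1: A fails the subset loop, B hits a `none` lookup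
    rw [Bool.of_not_eq_true hsub]
    rcases List.all_eq_false.mp (Bool.of_not_eq_true hsub) with ⟨k, hk, hc⟩
    have hg : d1.get? k = none := by
      rw [PySem.Dict.contains_eq_isSome_get?] at hc
      cases hgg : d1.get? k with
      | none => rfl
      | some w => rw [hgg] at hc; simp at hc
    have hfalse : (d2.keys.all ((fun p => match d1.get? p.1 with
                          | none => false
                          | some w => decide (¬ w < p.2)) ∘ fun k => (k, d2.getD k 0))) = false := by
      simp only [List.all_eq_false]
      exact ⟨k, hk, by simp [Function.comp, hg]⟩
    rw [hfalse]
    simp
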